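-- pv_equiv track=rewrite | github.com/honux77/algorithm | programmers/42840-3-idiots.py | solution
-- ===== SOURCE A (Python) =====
-- def solution(answers):
--     mans = [
--         [1, 2, 3, 4, 5],
--         [2, 1, 2, 3, 2, 4, 2, 5],
--         [3, 3, 1, 1, 2, 2, 4, 4, 5, 5],
--     ]
--     counts = []
--     for man in mans:
--         c = 0
--         for (i, ans) in enumerate(answers):
--             c = c + 1 if man[i % len(man)] == ans else c
--         counts.append(c)
--
--     max_score = max(counts)
--     res = []
--     for i, count in enumerate(counts):
--         if count == max_score:
--             res.append(i + 1)
--     return res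
-- ===== SOURCE B (Python) =====
-- def solution(answers):
--     patterns = [
--         [1, 2, 3, 4, 5],
--         [2, 1, 2, 3, 2, 4, 2, 5],
--         [3, 3, 1, 1, 2, 2, 4, 4, 5, 5],
--     ]
--     # 40 = lcm(5, 8, 10): a position i behaves like i % 40 for all three patterns,
--     # so one histogram over (i % 40, answer) pairs determines every score.
--     hist = {}
--     for i, ans in enumerate(answers):
--         key = (i % 40, ans)
--         hist[key] = hist.get(key, 0) + 1
--     counts = [sum(hist.get((r, p[r % len(p)]), 0) for r in range(40)) for p in patterns]
--     best = max(counts)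
--     return [i + 1 for i, c in enumerate(counts) if c == best]
-- ===== Notes on version B (the rewrite author's own statement) =====
-- stated objective: alternative
-- what changed: B builds one histogram keyed by (position mod 40, answer) (40 = lcm of the three pattern lengths) in a single scan and then computes each idiot's score as a fixed 40-term lookup sum over that histogram, instead of A's per-pattern rescan of the whole answer list; the argmax collection is a filter/map comprehension instead of A's append loop.
import Mathlib
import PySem

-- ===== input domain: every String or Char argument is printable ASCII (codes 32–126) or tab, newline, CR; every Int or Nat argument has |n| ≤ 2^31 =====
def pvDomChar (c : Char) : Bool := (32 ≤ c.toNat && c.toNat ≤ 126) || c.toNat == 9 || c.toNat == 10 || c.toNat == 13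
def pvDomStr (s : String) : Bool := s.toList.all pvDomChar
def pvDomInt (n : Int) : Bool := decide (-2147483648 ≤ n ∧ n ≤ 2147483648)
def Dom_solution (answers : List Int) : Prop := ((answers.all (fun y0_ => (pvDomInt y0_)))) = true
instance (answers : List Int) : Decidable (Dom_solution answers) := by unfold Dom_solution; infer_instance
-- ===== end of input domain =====

-- B replaces A's per-pattern scans of the whole answer list by ONE histogram of
-- (position mod 40, answer) pairs (40 = lcm of the pattern lengths), from which each
-- score is a fixed 40-term sum (alternative algorithm; return values proved equal).

-- ===== PORT A =====
def solution (answers : List Int) : List Int :=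
  let mans : List (List Int) :=
    [[1, 2, 3, 4, 5],
     [2, 1, 2, 3, 2, 4, 2, 5],
     [3, 3, 1, 1, 2, 2, 4, 4, 5, 5]]
  let counts : List Int := mans.foldl (fun counts man =>
    counts ++ [(PySem.List.enumerate answers 0).foldl
      (fun c p =>
        -- man[i % len(man)]: the index is always in range, pyGetD is exact here
        if PySem.List.pyGetD man (PySem.Int.mod p.1 (PySem.List.len man)) 0 == p.2 then c + 1 else c) 0]) []
  let max_score : Int := (PySem.List.max? counts (fun x => x)).getD 0  -- counts has 3 elements, max never raises
  (PySem.List.enumerate counts 0).foldl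
    (fun res p => if p.2 == max_score then res ++ [p.1 + 1] else res) []

-- ===== PORT B =====
def solution_alt (answers : List Int) : List Int :=
  let patterns : List (List Int) :=
    [[1, 2, 3, 4, 5],
     [2, 1, 2, 3, 2, 4, 2, 5],
     [3, 3, 1, 1, 2, 2, 4, 4, 5, 5]]
  let hist : PySem.Dict (Int × Int) Int :=
    (PySem.List.enumerate answers 0).foldl
      (fun d p =>
        let key : Int × Int := (PySem.Int.mod p.1 40, p.2)
        d.insert key (d.getD key 0 + 1))
      PySem.Dict.empty
  let counts : List Int := patterns.map (fun p =>
    ((PySem.List.pyRange 0 40 1).map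
      (fun r => hist.getD (r, PySem.List.pyGetD p (PySem.Int.mod r (PySem.List.len p)) 0) 0)).sum)
  let best : Int := (PySem.List.max? counts (fun x => x)).getD 0  -- counts has 3 elements, max never raises
  ((PySem.List.enumerate counts 0).filter (fun q => q.2 == best)).map (fun q => q.1 + 1)

-- ===== PRECONDITION & SPEC =====
def Spec_solution (answers : List Int) (out : List Int) : Prop := out = solution_alt answers
instance (answers : List Int) (out : List Int) : Decidable (Spec_solution answers out) := by unfold Spec_solution; infer_instance

-- ===== CLAIM (what is proved, stated in full; the proofs are below) =====
def Claim_equal_solution : Prop := ∀ (answers : List Int), Dom_solution answers → Spec_solution answers (solution answers)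

-- ===== LEMMAS AND PROOFS =====


theorem sum_map_ite_eq_count (l : List Int) (i c : Int) :
    (l.map (fun r => if r = i then c else 0)).sum = (l.count i : Int) * c := by
  induction l with
  | nil => simp
  | cons x t ih =>
    by_cases h : x = i
    · simp [h, ih]; ring
    · simp [h, ih]

theorem count_cons_pair (g : Int → Int) (q : Int × Int) (t : List (Int × Int)) (r : Int) :
    (((q :: t).count (r, g r) : Int))
      = (t.count (r, g r) : Int) + (if r = q.1 then (if g q.1 = q.2 then (1:Int) else 0) else 0) := by
  rw [List.count_cons]
  push_cast
  congr 1
  by_cases hr : r = q.1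
  · subst hr
    by_cases hg : g q.1 = q.2
    · simp [Prod.ext_iff, hg.symm]
    · have : ¬ q = (q.1, g q.1) := by
        rw [Prod.ext_iff]; exact fun h => hg h.2.symm
      simp [this, hg]
  · have : ¬ q = (r, g r) := by
      rw [Prod.ext_iff]; exact fun h => hr h.1.symm
    simp [hr, this]

theorem sum_count_range (g : Int → Int) (ks : List (Int × Int))
    (h : ∀ p ∈ ks, 0 ≤ p.1 ∧ p.1 < 40) :
    ((PySem.List.pyRange 0 40 1).map (fun r => (ks.count (r, g r) : Int))).sum
      = (ks.countP (fun p => g p.1 == p.2) : Int) := by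
  induction ks with
  | nil => simp
  | cons q t ih =>
    have hq := h q (List.mem_cons_self)
    have ht : ∀ p ∈ t, 0 ≤ p.1 ∧ p.1 < 40 := fun p hp => h p (List.mem_cons_of_mem _ hp)
    simp only [count_cons_pair]
    rw [PySem.List.sum_map_add_int, ih ht, sum_map_ite_eq_count]
    have hmem : q.1 ∈ PySem.List.pyRange 0 40 1 := by
      rw [PySem.List.mem_pyRange_one]; omega
    have hcount : (PySem.List.pyRange 0 40 1).count q.1 = 1 :=
      List.count_eq_one_of_mem (by decide) hmem
    rw [List.countP_cons, hcount]
    by_cases hg : g q.1 = q.2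
    · simp [hg]
    · simp [hg]

theorem count_eq (answers man : List Int)
    (hpos : 0 < PySem.List.len man) (hdvd : PySem.List.len man ∣ 40) :
    (PySem.List.enumerate answers 0).foldl
      (fun c p => if PySem.List.pyGetD man (PySem.Int.mod p.1 (PySem.List.len man)) 0 == p.2 then c + 1 else c) (0 : Int)
    = ((PySem.List.pyRange 0 40 1).map
        (fun r => ((PySem.List.enumerate answers 0).foldl
            (fun d p => d.insert (PySem.Int.mod p.1 40, p.2)
                          (d.getD (PySem.Int.mod p.1 40, p.2) 0 + 1))
            (PySem.Dict.empty : PySem.Dict (Int × Int) Int)).getD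
          (r, PySem.List.pyGetD man (PySem.Int.mod r (PySem.List.len man)) 0) 0)).sum := by
  have hhist : ∀ v : Int × Int,
      ((PySem.List.enumerate answers 0).foldl
        (fun d p => d.insert (PySem.Int.mod p.1 40, p.2)
                      (d.getD (PySem.Int.mod p.1 40, p.2) 0 + 1))
        (PySem.Dict.empty : PySem.Dict (Int × Int) Int)).getD v 0
      = ((((PySem.List.enumerate answers 0).map (fun p => (PySem.Int.mod p.1 40, p.2))).count v : Int)) := by
    intro v
    have hfm := List.foldl_map (f := fun p : Int × Int => (PySem.Int.mod p.1 40, p.2))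
          (g := fun (d : PySem.Dict (Int × Int) Int) (x : Int × Int) => d.insert x (d.getD x 0 + 1))
          (l := PySem.List.enumerate answers 0) (init := PySem.Dict.empty)
    rw [← hfm, PySem.Dict.getD_foldl_insert_add_one]
    simp [PySem.Dict.empty, PySem.Dict.getD, PySem.Dict.get?]
  rw [show (fun r => ((PySem.List.enumerate answers 0).foldl
            (fun d p => d.insert (PySem.Int.mod p.1 40, p.2)
                          (d.getD (PySem.Int.mod p.1 40, p.2) 0 + 1))
            (PySem.Dict.empty : PySem.Dict (Int × Int) Int)).getD
          (r, PySem.List.pyGetD man (PySem.Int.mod r (PySem.List.len man)) 0) 0)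
      = (fun r => ((((PySem.List.enumerate answers 0).map (fun p => (PySem.Int.mod p.1 40, p.2))).count
          (r, PySem.List.pyGetD man (PySem.Int.mod r (PySem.List.len man)) 0) : Int)))
    from funext fun r => hhist _]
  rw [sum_count_range (fun r => PySem.List.pyGetD man (PySem.Int.mod r (PySem.List.len man)) 0)
        ((PySem.List.enumerate answers 0).map (fun p => (PySem.Int.mod p.1 40, p.2)))
        (by
          intro p hp
          rcases List.mem_map.mp hp with ⟨qq, _, rfl⟩
          exact ⟨PySem.Int.mod_nonneg _ (by omega), PySem.Int.mod_lt _ (by omega)⟩)]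
  rw [PySem.List.foldl_if_add_one]
  rw [List.countP_map]
  have hmod : ∀ i : Int,
      PySem.Int.mod (PySem.Int.mod i 40) (PySem.List.len man) = PySem.Int.mod i (PySem.List.len man) := by
    intro i
    rw [PySem.Int.mod_eq_emod_of_pos (by omega : (0:Int) < 40),
        PySem.Int.mod_eq_emod_of_pos hpos, PySem.Int.mod_eq_emod_of_pos hpos]
    exact Int.emod_emod_of_dvd i hdvd
  simp only [Function.comp_def, hmod]
  simp

-- ===== VERDICT (by name: the statement is the Claim_ definition above) =====
theorem solution_spec : Claim_equal_solution := by
  intro answers _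
  show solution answers = solution_alt answers
  unfold solution solution_alt
  simp only [List.foldl_cons, List.foldl_nil, List.map_cons, List.map_nil]
  simp only [count_eq answers [1,2,3,4,5] (by decide) (by decide),
    count_eq answers [2,1,2,3,2,4,2,5] (by decide) (by decide),
    count_eq answers [3,3,1,1,2,2,4,4,5,5] (by decide) (by decide)]
  rw [PySem.List.foldl_append_if]
  simp
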